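-- pv_equiv track=rewrite | github.com/pmfcommunity/Programiranje-1 | Laboratorijske Vježbe/LV9/Zadatak_2.py | pojavljivanje_najveceg_stringa
-- ===== SOURCE A (Python) =====
-- def pojavljivanje_najveceg_stringa(recenica):
--     najduza = ""
--     for rijec in recenica:
--         if len(rijec) > len(najduza):
--             najduza = rijec
--
--     brojac = 0
--     for rijec in recenica:
--         if rijec == najduza: brojac += 1
--     return brojac
-- ===== SOURCE B (Python) =====
-- def pojavljivanje_najveceg_stringa(recenica):
--     najduza = ""
--     brojac = 0
--     for rijec in recenica:
--         if len(rijec) > len(najduza):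
--             najduza = rijec
--             brojac = 1
--         elif rijec == najduza:
--             brojac += 1
--     return brojac
-- ===== Notes on version B (the rewrite author's own statement) =====
-- stated objective: alternative
-- what changed: Replaces A's two separate passes (find the longest word, then count its occurrences) by one single-pass loop maintaining the current longest word and a running count that resets to 1 whenever a strictly longer word appears.
import Mathlib
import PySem

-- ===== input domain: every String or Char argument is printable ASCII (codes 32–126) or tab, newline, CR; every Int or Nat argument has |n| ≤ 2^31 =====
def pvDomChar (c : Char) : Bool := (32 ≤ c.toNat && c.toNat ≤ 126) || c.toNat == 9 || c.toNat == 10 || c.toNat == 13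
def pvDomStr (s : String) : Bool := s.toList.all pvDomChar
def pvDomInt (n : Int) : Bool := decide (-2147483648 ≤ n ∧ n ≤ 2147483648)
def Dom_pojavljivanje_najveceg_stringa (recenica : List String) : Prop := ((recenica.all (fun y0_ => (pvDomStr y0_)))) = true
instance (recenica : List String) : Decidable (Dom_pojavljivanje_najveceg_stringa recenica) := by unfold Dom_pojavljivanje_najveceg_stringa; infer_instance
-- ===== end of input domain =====

-- B merges A's two passes (find longest, then count it) into one single-pass loop; same O(n) cost, different decomposition.


-- ===== PORT A =====
-- two passes: first find the longest word, then count its occurrences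
def pojavljivanje_najveceg_stringa (recenica : List String) : Int :=
  let najduza := recenica.foldl
    (fun najduza rijec => if PySem.Str.len rijec > PySem.Str.len najduza then rijec else najduza) ""
  let brojac := recenica.foldl
    (fun brojac rijec => if rijec == najduza then brojac + 1 else brojac) (0 : Int)
  brojac

-- ===== PORT B =====
-- single pass: keep (current longest, running count); reset the count on a strictly longer word
def pojavljivanje_najveceg_stringa_alt (recenica : List String) : Int :=
  (recenica.foldl
    (fun s rijec =>
      if PySem.Str.len rijec > PySem.Str.len s.1 then (rijec, (1 : Int))
      else if rijec == s.1 then (s.1, s.2 + 1)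
      else s)
    ("", (0 : Int))).2

-- ===== PRECONDITION & SPEC =====
def Spec_pojavljivanje_najveceg_stringa (recenica : List String) (out : Int) : Prop := out = pojavljivanje_najveceg_stringa_alt recenica
instance (recenica : List String) (out : Int) : Decidable (Spec_pojavljivanje_najveceg_stringa recenica out) := by unfold Spec_pojavljivanje_najveceg_stringa; infer_instance

-- ===== CLAIM (what is proved, stated in full; the proofs are below) =====
def Claim_equal_pojavljivanje_najveceg_stringa : Prop := ∀ (recenica : List String), Dom_pojavljivanje_najveceg_stringa recenica → Spec_pojavljivanje_najveceg_stringa recenica (pojavljivanje_najveceg_stringa recenica)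

-- ===== LEMMAS AND PROOFS =====

-- number of occurrences of w in l, as an Int
def pvCnt (w : String) : List String → Int
  | [] => 0
  | r :: l => (if r == w then 1 else 0) + pvCnt w l

-- A's second fold, started from c, is c + the occurrence count
theorem pvCount_fold (w : String) (l : List String) :
    ∀ c : Int, l.foldl (fun brojac rijec => if rijec == w then brojac + 1 else brojac) c
      = c + pvCnt w l := by
  induction l with
  | nil => intro c; simp [pvCnt]
  | cons r l ih =>
    intro c
    simp only [List.foldl_cons]
    by_cases h : r = w
    · rw [if_pos (by simp [h]), ih, pvCnt, if_pos (by simp [h])]; ring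
    · rw [if_neg (by simp [h]), ih, pvCnt, if_neg (by simp [h])]; ring

-- A's first fold either returns the seed or something strictly longer
theorem pvLongest_cases (l : List String) :
    ∀ n : String,
      l.foldl (fun najduza rijec => if PySem.Str.len rijec > PySem.Str.len najduza then rijec else najduza) n = n
      ∨ PySem.Str.len n <
          PySem.Str.len (l.foldl (fun najduza rijec => if PySem.Str.len rijec > PySem.Str.len najduza then rijec else najduza) n) := by
  induction l with
  | nil => intro n; exact Or.inl rfl
  | cons r l ih =>
    intro n
    simp only [List.foldl_cons]
    by_cases h : PySem.Str.len r > PySem.Str.len n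
    · rw [if_pos h]
      rcases ih r with h1 | h1
      · right; rw [h1]; exact h
      · right; exact lt_trans h h1
    · rw [if_neg h]
      exact ih n

-- the single-pass invariant: B's fold from (n, c) yields A's longest from seed n,
-- paired with its count in l (plus c if the longest stayed the seed)
theorem pvFoldB_eq (l : List String) :
    ∀ (n : String) (c : Int),
      (l.foldl
        (fun s rijec =>
          if PySem.Str.len rijec > PySem.Str.len s.1 then (rijec, (1 : Int))
          else if rijec == s.1 then (s.1, s.2 + 1)
          else s)
        (n, c))
      = (l.foldl (fun najduza rijec => if PySem.Str.len rijec > PySem.Str.len najduza then rijec else najduza) n,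
         (if l.foldl (fun najduza rijec => if PySem.Str.len rijec > PySem.Str.len najduza then rijec else najduza) n = n then c else 0)
           + pvCnt (l.foldl (fun najduza rijec => if PySem.Str.len rijec > PySem.Str.len najduza then rijec else najduza) n) l) := by
  induction l with
  | nil => intro n c; simp [pvCnt]
  | cons r l ih =>
    intro n c
    simp only [List.foldl_cons]
    by_cases h : PySem.Str.len r > PySem.Str.len n
    · simp only [if_pos h]
      rw [ih r 1]
      set A2 := l.foldl (fun najduza rijec => if PySem.Str.len rijec > PySem.Str.len najduza then rijec else najduza) r with hA2
      have hlen : PySem.Str.len n < PySem.Str.len A2 := by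
        rcases pvLongest_cases l r with h1 | h1
        · rw [hA2, h1]; exact h
        · exact lt_trans h h1
      have hne : A2 ≠ n := fun he => by rw [he] at hlen; exact lt_irrefl _ hlen
      rw [if_neg hne]
      congr 1
      have h2 : pvCnt A2 (r :: l) = (if r == A2 then 1 else 0) + pvCnt A2 l := rfl
      rw [h2]
      by_cases hr : A2 = r
      · rw [if_pos hr, if_pos (by simp only [beq_iff_eq]; exact hr.symm)]; ring
      · rw [if_neg hr, if_neg (by simp only [beq_iff_eq]; intro hx; exact hr hx.symm)]; ring
    · simp only [if_neg h]
      by_cases he : r = n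
      · rw [if_pos (by simp only [beq_iff_eq]; exact he), ih n (c + 1)]
        set A2 := l.foldl (fun najduza rijec => if PySem.Str.len rijec > PySem.Str.len najduza then rijec else najduza) n with hA2
        congr 1
        have h2 : pvCnt A2 (r :: l) = (if r == A2 then 1 else 0) + pvCnt A2 l := rfl
        rw [h2]
        by_cases hAn : A2 = n
        · rw [if_pos hAn, if_pos hAn, if_pos (by simp only [beq_iff_eq, he]; exact hAn.symm)]; ring
        · rw [if_neg hAn, if_neg hAn, if_neg (by simp only [beq_iff_eq, he]; intro hx; exact hAn hx.symm)]; ring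
      · rw [if_neg (by simp only [beq_iff_eq]; exact he), ih n c]
        set A2 := l.foldl (fun najduza rijec => if PySem.Str.len rijec > PySem.Str.len najduza then rijec else najduza) n with hA2
        congr 1
        have hrA2 : r ≠ A2 := by
          intro hcontra
          rcases pvLongest_cases l n with h1 | h1
          · rw [hA2, h1] at hcontra; exact he hcontra
          · rw [← hA2] at h1
            rw [hcontra] at h
            exact h h1
        have h2 : pvCnt A2 (r :: l) = (if r == A2 then 1 else 0) + pvCnt A2 l := rfl
        rw [h2]
        simp [hrA2]

-- ===== VERDICT (by name: the statement is the Claim_ definition above) =====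
theorem pojavljivanje_najveceg_stringa_spec : Claim_equal_pojavljivanje_najveceg_stringa := by
  intro recenica _
  unfold Spec_pojavljivanje_najveceg_stringa
  show (recenica.foldl
      (fun brojac rijec =>
        if rijec == recenica.foldl (fun najduza rijec => if PySem.Str.len rijec > PySem.Str.len najduza then rijec else najduza) "" then brojac + 1 else brojac)
      (0 : Int))
    = pojavljivanje_najveceg_stringa_alt recenica
  unfold pojavljivanje_najveceg_stringa_alt
  rw [pvFoldB_eq recenica "" 0, pvCount_fold]
  by_cases hb : recenica.foldl (fun najduza rijec => if PySem.Str.len rijec > PySem.Str.len najduza then rijec else najduza) "" = ""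
  · rw [if_pos hb]
  · rw [if_neg hb]
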